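-- pv_equiv track=rewrite | github.com/NiceToMeeetU/ToGetReady | Code/examination/0821网易.py | mostItems
-- ===== SOURCE A (Python) =====
-- def mostItems(query, items):
--     res = []
--     for idx, line in enumerate(items):
--         score = 0
--         #counts = dict(Counter(line))
--         for q in query:
--             if q in line:
--                 #score += counts.get(q, 0)
--                 score += 1
--         res.append((line, score, idx))
--     res = sorted(res, key=lambda x: (-x[1], x[2], x[0]), reverse=False)
--     return res
-- ===== SOURCE B (Python) =====
-- def mostItems(query, items):
--     # query-driven scoring + bucket-by-score assembly (no comparison sort of items)
--     n = len(items)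
--     score = [0] * n
--     for q in query:
--         score = [s + (q in line) for s, line in zip(score, items)]
--     res = [(line, s, i) for i, (line, s) in enumerate(zip(items, score))]
--     return [t for s in sorted(set(score), reverse=True) for t in res if t[1] == s]
-- ===== Notes on version B (the rewrite author's own statement) =====
-- stated objective: alternative
-- what changed: B inverts the traversal: scores are accumulated query-driven (a fold of per-query zipWith passes over a score vector) instead of per-item inner loops, and the output is assembled by concatenating score buckets in descending score order (exploiting that indices are unique, so the tuple-key comparison sort is unnecessary) instead of sorting by the key (-score, idx, line).
import Mathlib
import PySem

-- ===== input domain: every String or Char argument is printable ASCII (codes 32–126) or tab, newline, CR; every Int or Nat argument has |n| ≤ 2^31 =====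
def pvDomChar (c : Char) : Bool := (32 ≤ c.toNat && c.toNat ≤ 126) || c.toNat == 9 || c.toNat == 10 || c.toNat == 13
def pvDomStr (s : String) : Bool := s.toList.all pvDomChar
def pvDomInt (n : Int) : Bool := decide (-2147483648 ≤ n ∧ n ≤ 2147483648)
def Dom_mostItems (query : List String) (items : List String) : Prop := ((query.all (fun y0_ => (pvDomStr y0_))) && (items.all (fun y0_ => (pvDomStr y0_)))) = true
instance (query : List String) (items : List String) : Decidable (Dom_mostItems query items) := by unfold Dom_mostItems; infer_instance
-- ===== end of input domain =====

-- B inverts A's traversal: query-driven scoring (a fold of zipWith over the items) and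
-- bucket-by-score assembly in descending score order, instead of A's item-driven nested
-- loops followed by a tuple-key sort ('alternative': same cost, different decomposition).


-- ===== PORT A =====
-- Python's sort key tuple (-x[1], x[2], x[0]), as a strict lexicographic comparison.
def pvKeyLt (a b : String × Int × Int) : Bool :=
  decide (-a.2.1 < -b.2.1 ∨ (-a.2.1 = -b.2.1 ∧ (a.2.2 < b.2.2 ∨ (a.2.2 = b.2.2 ∧ a.1 < b.1))))

-- sorted(res, key=lambda x: (-x[1], x[2], x[0])): exactly the stable insertion-sort
-- scheme of PySem.List.sorted (cf. PySem.List.sorted_eq_foldl_insertBy), with the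
-- tuple-valued key compared lexicographically by pvKeyLt (exact: a stable sort with this
-- strict comparison is Python's stable sort by that key tuple).
def pvSorted3 (xs : List (String × Int × Int)) : List (String × Int × Int) :=
  xs.foldl (fun acc x => PySem.List.insertBy pvKeyLt x acc) []

def mostItems (query : List String) (items : List String) : List (String × Int × Int) :=
  let res := (PySem.List.enumerate items).foldl
    (fun acc p =>
      acc ++ [(p.2,
               query.foldl (fun score q => if PySem.Str.isIn q p.2 then score + 1 else score) (0 : Int),
               p.1)]) []
  pvSorted3 res

-- ===== PORT B =====
def mostItems_alt (query : List String) (items : List String) : List (String × Int × Int) :=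
  let n := items.length
  let score := query.foldl
    (fun sc q => List.zipWith (fun s line => s + (if PySem.Str.isIn q line then (1 : Int) else 0)) sc items)
    (List.replicate n (0 : Int))
  let res := (PySem.List.enumerate (items.zip score)).map (fun p => (p.2.1, p.2.2, p.1))
  (PySem.List.sorted (PySem.Set.ofList score) (fun s => s) true).flatMap
    (fun s => res.filter (fun t => t.2.1 == s))

-- ===== PRECONDITION & SPEC =====
def Spec_mostItems (query : List String) (items : List String) (out : List (String × Int × Int)) : Prop := out = mostItems_alt query items
instance (query : List String) (items : List String) (out : List (String × Int × Int)) : Decidable (Spec_mostItems query items out) := by unfold Spec_mostItems; infer_instance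

-- ===== CLAIM (what is proved, stated in full; the proofs are below) =====
def Claim_equal_mostItems : Prop := ∀ (query : List String) (items : List String), Dom_mostItems query items → Spec_mostItems query items (mostItems query items)

-- ===== LEMMAS AND PROOFS =====

def pvLtT (a b : String × Int × Int) : Prop :=
  -a.2.1 < -b.2.1 ∨ (-a.2.1 = -b.2.1 ∧ (a.2.2 < b.2.2 ∨ (a.2.2 = b.2.2 ∧ a.1 < b.1)))

theorem pvKeyLt_iff (a b : String × Int × Int) : pvKeyLt a b = true ↔ pvLtT a b := by
  simp [pvKeyLt, pvLtT]

theorem insertBy_perm_cons {α : Type} (bf : α → α → Bool) (x : α) (ys : List α) :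
    (PySem.List.insertBy bf x ys).Perm (x :: ys) := by
  induction ys with
  | nil => simp [PySem.List.insertBy]
  | cons y ys ih =>
      by_cases h : bf x y
      · simp [PySem.List.insertBy, h]
      · simp only [PySem.List.insertBy, h]
        exact ((ih.cons y).trans (List.Perm.swap x y ys))

theorem foldl_insertBy_perm {α : Type} (bf : α → α → Bool) :
    ∀ (xs acc : List α), (xs.foldl (fun acc x => PySem.List.insertBy bf x acc) acc).Perm (acc ++ xs) := by
  intro xs
  induction xs with
  | nil => intro acc; simp
  | cons x xs ih =>
      intro acc
      simp only [List.foldl_cons]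
      exact ((ih _).trans (((insertBy_perm_cons bf x acc).append_right xs).trans List.perm_middle.symm))

theorem pvSorted3_perm (xs : List (String × Int × Int)) : (pvSorted3 xs).Perm xs := by
  simpa using foldl_insertBy_perm pvKeyLt xs []

theorem pvLtT_asymm {a b : String × Int × Int} (h : pvLtT a b) : ¬ pvLtT b a := by
  rcases h with h | ⟨h1, h | ⟨h2, h3⟩⟩ <;>
    rintro (g | ⟨g1, g | ⟨g2, g3⟩⟩) <;> first | omega | exact absurd h3 (not_lt_of_gt g3)

theorem pvLtT_trans {a b c : String × Int × Int} (h : pvLtT a b) (h' : pvLtT b c) : pvLtT a c := by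
  rcases h with h | ⟨h1, h | ⟨h2, h3⟩⟩ <;> rcases h' with g | ⟨g1, g | ⟨g2, g3⟩⟩ <;>
    first
      | (left; omega)
      | (right; exact ⟨by omega, Or.inl (by omega)⟩)
      | (right; exact ⟨by omega, Or.inr ⟨by omega, lt_trans h3 g3⟩⟩)

theorem pvLtT_of_not_gt_of_idx_ne {a b : String × Int × Int}
    (h : ¬ pvLtT b a) (hne : a.2.2 ≠ b.2.2) : pvLtT a b := by
  unfold pvLtT at *
  by_cases hs : -a.2.1 = -b.2.1
  · right; exact ⟨hs, Or.inl (by omega)⟩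
  · left; omega

theorem insertBy_pairwise {x : String × Int × Int} {ys : List (String × Int × Int)}
    (h : ys.Pairwise (fun a b => ¬ pvLtT b a)) :
    (PySem.List.insertBy pvKeyLt x ys).Pairwise (fun a b => ¬ pvLtT b a) := by
  induction ys with
  | nil => simp [PySem.List.insertBy]
  | cons y ys ih =>
      rcases h with _ | ⟨hy, hys⟩
      by_cases hb : pvKeyLt x y
      · simp only [PySem.List.insertBy, hb, if_true]
        refine List.Pairwise.cons ?_ (List.Pairwise.cons hy hys)
        intro z hz
        rcases List.mem_cons.mp hz with h0 | hz
        · exact h0 ▸ pvLtT_asymm ((pvKeyLt_iff x y).mp hb)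
        · intro hlt
          exact hy z hz (pvLtT_trans hlt ((pvKeyLt_iff x y).mp hb))
      · simp only [PySem.List.insertBy, hb]
        refine List.Pairwise.cons ?_ (ih hys)
        intro z hz
        rcases (PySem.List.mem_insertBy pvKeyLt x z ys).mp hz with h0 | hz
        · exact h0 ▸ (fun hlt => hb ((pvKeyLt_iff x y).mpr hlt))
        · exact hy z hz

theorem pvSorted3_pairwise (xs : List (String × Int × Int)) :
    (pvSorted3 xs).Pairwise (fun a b => ¬ pvLtT b a) := by
  suffices h : ∀ (xs acc : List (String × Int × Int)), acc.Pairwise (fun a b => ¬ pvLtT b a) →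
      (xs.foldl (fun acc x => PySem.List.insertBy pvKeyLt x acc) acc).Pairwise (fun a b => ¬ pvLtT b a) by
    exact h xs [] List.Pairwise.nil
  intro xs
  induction xs with
  | nil => intro acc h; simpa using h
  | cons x xs ih => intro acc h; exact ih _ (insertBy_pairwise h)

theorem flatMap_filter_perm {α : Type} (key : α → Int) :
    ∀ (vs : List Int) (l : List α), vs.Nodup → (∀ t ∈ l, key t ∈ vs) →
      (vs.flatMap (fun s => l.filter (fun t => key t == s))).Perm l := by
  intro vs
  induction vs with
  | nil =>
      intro l _ hcov
      cases l with
      | nil => simp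
      | cons t l => exact absurd (hcov t (by simp)) (by simp)
  | cons v vs ih =>
      intro l hnd hcov
      rcases hnd with _ | ⟨hv, hnd⟩
      have hstep : ∀ s ∈ vs, l.filter (fun t => key t == s)
          = (l.filter (fun t => !(key t == v))).filter (fun t => key t == s) := by
        intro s hs
        rw [List.filter_filter]
        refine (List.filter_congr ?_)
        intro t _
        by_cases h : key t == s
        · have hs' : key t = s := by simpa using h
          have hne : (key t == v) = false := by
            simp only [beq_eq_false_iff_ne, hs']
            exact fun e => (hv s hs) e.symm
          simp [h, hne]
        · simp [h]
      have hcov' : ∀ t ∈ l.filter (fun t => !(key t == v)), key t ∈ vs := by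
        intro t ht
        rcases List.mem_filter.mp ht with ⟨htl, hne⟩
        rcases List.mem_cons.mp (hcov t htl) with h | h
        · simp [h] at hne
        · exact h
      have hrw : vs.flatMap (fun s => l.filter (fun t => key t == s))
          = vs.flatMap (fun s => (l.filter (fun t => !(key t == v))).filter (fun t => key t == s)) :=
        List.flatMap_congr hstep
      have hperm := ih (l.filter (fun t => !(key t == v))) hnd hcov'
      simp only [List.flatMap_cons, hrw]
      exact (hperm.append_left _).trans (List.filter_append_perm (fun t => key t == v) l)

theorem score_foldl_eq (items : List String) :
    ∀ (qs : List String) (g : String → Int),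
      qs.foldl (fun sc q => List.zipWith (fun s line => s + (if PySem.Str.isIn q line then (1 : Int) else 0)) sc items) (items.map g)
      = items.map (fun line => g line + (qs.countP (fun q => PySem.Str.isIn q line) : Int)) := by
  intro qs
  induction qs with
  | nil => intro g; simp
  | cons q qs ih =>
      intro g
      simp only [List.foldl_cons]
      have hz : List.zipWith (fun s line => s + (if PySem.Str.isIn q line then (1 : Int) else 0)) (items.map g) items
          = items.map (fun line => g line + (if PySem.Str.isIn q line then (1 : Int) else 0)) := by
        rw [List.zipWith_map_left, List.zipWith_self]
      rw [hz, ih]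
      refine List.map_congr_left ?_
      intro line _
      rw [List.countP_cons]
      by_cases h : PySem.Str.isIn q line = true
      · rw [if_pos h, if_pos h]; push_cast; ring
      · rw [if_neg h, if_neg h]; push_cast; ring

theorem enumerate_map {α β : Type} (h : α → β) :
    ∀ (l : List α) (s : Int),
      PySem.List.enumerate (l.map h) s = (PySem.List.enumerate l s).map (fun p => (p.1, h p.2)) := by
  intro l
  induction l with
  | nil => intro s; simp [PySem.List.enumerate]
  | cons x l ih => intro s; simp [PySem.List.enumerate_cons, ih]

theorem main_eq (query items : List String) : mostItems query items = mostItems_alt query items := by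
  unfold mostItems mostItems_alt
  dsimp only
  set f : String → Int := fun line => ((query.countP (fun q => PySem.Str.isIn q line) : Nat) : Int) with hf
  set R : List (String × Int × Int) := (PySem.List.enumerate items 0).map (fun p => (p.2, f p.2, p.1)) with hR
  -- A's pre-sort list is R
  have hA : (PySem.List.enumerate items 0).foldl
      (fun acc p =>
        acc ++ [(p.2,
                 query.foldl (fun score q => if PySem.Str.isIn q p.2 then score + 1 else score) (0 : Int),
                 p.1)]) [] = R := by
    have h1 : ∀ (p : Int × String),
        query.foldl (fun score q => if PySem.Str.isIn q p.2 then score + 1 else score) (0 : Int)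
        = f p.2 := by
      intro p
      rw [PySem.List.foldl_if_add_one (fun q => PySem.Str.isIn q p.2) query 0]
      simp [hf]
    have hcongr := PySem.List.foldl_congr_mem
      (l := PySem.List.enumerate items)
      (init := ([] : List (String × Int × Int)))
      (f := fun acc p => acc ++ [(p.2, query.foldl (fun score q => if PySem.Str.isIn q p.2 then score + 1 else score) (0 : Int), p.1)])
      (g := fun acc p => acc ++ [(p.2, f p.2, p.1)])
      (fun acc p _ => by simp only [h1 p])
    rw [hcongr, PySem.List.foldl_append_singleton_eq_map (fun (p : Int × String) => (p.2, f p.2, p.1))]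
    simp [hR]
  -- B's score list
  have hscore : query.foldl
      (fun sc q => List.zipWith (fun s line => s + (if PySem.Str.isIn q line then (1 : Int) else 0)) sc items)
      (List.replicate items.length (0 : Int)) = items.map f := by
    rw [← List.map_const' (l := items) (b := (0 : Int))]
    rw [score_foldl_eq items query (fun _ => 0)]
    simp [hf]
  -- B's pre-sort list is R
  have hB : (PySem.List.enumerate (items.zip (items.map f)) 0).map (fun p => (p.2.1, p.2.2, p.1)) = R := by
    have hzip : items.zip (items.map f) = items.map (fun x => (x, f x)) := by
      simpa using (List.zip_map' (f := fun x => x) (g := f) (l := items))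
    rw [hzip, enumerate_map, List.map_map, hR]
    rfl
  rw [hA, hscore, hB]
  -- now: pvSorted3 R = buckets over R
  set L : List Int := PySem.List.sorted (PySem.Set.ofList (items.map f)) (fun s => s) true with hL
  have hLnd : L.Nodup :=
    ((PySem.List.sorted_perm (PySem.Set.ofList (items.map f)) (fun s => s) true).nodup_iff).mpr
      (PySem.Set.nodup_ofList _)
  have hLdec : L.Pairwise (fun a b => b ≤ a) :=
    PySem.List.sorted_pairwise_rev (PySem.Set.ofList (items.map f)) (fun s => s)
  have hLlt : L.Pairwise (fun a b => b < a) :=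
    (hLdec.and hLnd).imp (fun h => lt_of_le_of_ne h.1 (Ne.symm h.2))
  have hRidx : R.Pairwise (fun a b => a.2.2 < b.2.2) := by
    rw [hR, List.pairwise_map]
    exact PySem.List.pairwise_lt_enumerate items 0
  have hcov : ∀ t ∈ R, t.2.1 ∈ L := by
    intro t ht
    rw [hL, PySem.List.mem_sorted, PySem.Set.mem_ofList]
    rw [hR] at ht
    rcases List.mem_map.mp ht with ⟨p, hp, rfl⟩
    rcases (PySem.List.mem_enumerate_iff items 0 p).mp hp with ⟨k, hk, rfl⟩
    exact List.mem_map.mpr ⟨items[k], List.getElem_mem hk, rfl⟩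
  have hperm2 : (L.flatMap (fun s => R.filter (fun t => t.2.1 == s))).Perm R :=
    flatMap_filter_perm (fun t => t.2.1) L R hLnd hcov
  have hP1 : (pvSorted3 R).Pairwise pvLtT := by
    have h1 := pvSorted3_pairwise R
    have h2 : (pvSorted3 R).Pairwise (fun a b => a.2.2 ≠ b.2.2) := by
      refine ((pvSorted3_perm R).pairwise_iff ?_).mpr (hRidx.imp (fun h => ne_of_lt h))
      exact fun h => h.symm
    exact (h1.and h2).imp (fun h => pvLtT_of_not_gt_of_idx_ne h.1 h.2)
  have hP2 : (L.flatMap (fun s => R.filter (fun t => t.2.1 == s))).Pairwise pvLtT := by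
    rw [List.flatMap_def, List.pairwise_flatten]
    constructor
    · intro l' hl'
      rcases List.mem_map.mp hl' with ⟨s, _, rfl⟩
      refine (hRidx.filter _).imp_of_mem ?_
      intro a b ha hb hab
      have ha' : a.2.1 = s := by simpa using (List.mem_filter.mp ha).2
      have hb' : b.2.1 = s := by simpa using (List.mem_filter.mp hb).2
      right
      exact ⟨by omega, Or.inl hab⟩
    · rw [List.pairwise_map]
      refine hLlt.imp_of_mem ?_
      intro s1 s2 _ _ hlt x hx y hy
      have hx' : x.2.1 = s1 := by simpa using (List.mem_filter.mp hx).2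
      have hy' : y.2.1 = s2 := by simpa using (List.mem_filter.mp hy).2
      left
      omega
  refine List.Perm.eq_of_pairwise ?_ hP1 hP2 ((pvSorted3_perm R).trans hperm2.symm)
  intro a b _ _ h h'
  exact absurd h (pvLtT_asymm h')

-- ===== VERDICT (by name: the statement is the Claim_ definition above) =====
theorem mostItems_spec : Claim_equal_mostItems := by
  intro query items _
  unfold Spec_mostItems
  exact main_eq query items
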